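-- pv_equiv track=rewrite | github.com/wenruo0522/UCB-CS61A | solutions/homework/homework03/hw03.py | contains
-- ===== SOURCE A (Python) =====
-- def contains(a, b):
--     """Return whether the digits of a are contained in the digits of b.
--
--     >>> contains(357, 12345678)
--     True
--     >>> contains(753, 12345678)
--     False
--     >>> contains(357, 37)
--     False
--     """
--
--     if a == b:
--         return True
--     if a > b:
--         return False
--     if a % 10 == b % 10:
--         return contains(a // 10, b // 10)
--     else:
--         return contains(a, b // 10)
-- ===== SOURCE B (Python) =====
-- def _digits(n):
--     """Digits of n, least-significant first; [] for n <= 0."""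
--     ds = []
--     while n > 0:
--         ds.append(n % 10)
--         n //= 10
--     return ds
--
--
-- def _is_subseq(xs, ys):
--     if not xs:
--         return True
--     if not ys:
--         return False
--     if xs[0] == ys[0]:
--         return _is_subseq(xs[1:], ys[1:])
--     return _is_subseq(xs, ys[1:])
--
--
-- def contains(a, b):
--     if a == b:
--         return True
--     if a > b:
--         return False
--     return _is_subseq(_digits(a), _digits(b))
-- ===== Notes on version B (the rewrite author's own statement) =====
-- stated objective: alternative
-- what changed: Replaces A's four-way numeric recursion on (a,b) by extracting the digit lists of a and b (least-significant first) and running a standard subsequence check on the lists, keeping only the two trivial guards a==b / a>b.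
import Mathlib
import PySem

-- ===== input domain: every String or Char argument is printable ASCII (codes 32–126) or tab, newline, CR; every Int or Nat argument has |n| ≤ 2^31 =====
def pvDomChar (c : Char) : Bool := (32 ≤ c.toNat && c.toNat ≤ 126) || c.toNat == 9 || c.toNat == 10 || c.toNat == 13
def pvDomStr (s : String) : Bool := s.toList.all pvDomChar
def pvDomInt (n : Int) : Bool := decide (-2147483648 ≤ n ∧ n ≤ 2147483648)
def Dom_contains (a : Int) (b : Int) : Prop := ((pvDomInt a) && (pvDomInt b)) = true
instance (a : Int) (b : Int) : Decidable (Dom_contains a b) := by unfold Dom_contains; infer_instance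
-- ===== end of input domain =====

-- B replaces A's numeric recursion by a digit-list subsequence check (alternative
-- decomposition, similar cost). Equivalence is claimed on Pre_: exactly where A returns
-- (elsewhere A hits RecursionError).

-- ===== PORT A =====
-- literal transliteration of A's recursion; the fuel only makes the (Python-divergent)
-- recursion total, Pre_ guarantees it never runs out.
def containsFuel (fuel : Nat) (a b : Int) : Bool :=
  match fuel with
  | 0 => false
  | f + 1 =>
    if a = b then true
    else if a > b then false
    else if PySem.Int.mod a 10 = PySem.Int.mod b 10 then
      containsFuel f (PySem.Int.floordiv a 10) (PySem.Int.floordiv b 10)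
    else
      containsFuel f a (PySem.Int.floordiv b 10)

def contains (a : Int) (b : Int) : Bool := containsFuel (b.natAbs + 1) a b

-- ===== PORT B =====
-- digits of n, least-significant first; [] for n ≤ 0  (Source B's _digits while-loop)
def digitsLSB (n : Int) : List Int :=
  if _h : 0 < n then PySem.Int.mod n 10 :: digitsLSB (PySem.Int.floordiv n 10) else []
  termination_by n.natAbs
  decreasing_by
    rw [PySem.Int.floordiv_eq_ediv_of_pos (show (0 : Int) < 10 by norm_num)]
    omega

-- Source B's _is_subseq
def isSubseq : List Int → List Int → Bool
  | [], _ => true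
  | _ :: _, [] => false
  | x :: xs, y :: ys => if x = y then isSubseq xs ys else isSubseq (x :: xs) ys

def contains_alt (a : Int) (b : Int) : Bool :=
  if a = b then true
  else if a > b then false
  else isSubseq (digitsLSB a) (digitsLSB b)

-- ===== PRECONDITION & SPEC =====
-- Pre_ excludes exactly the inputs on which A diverges (Python RecursionError):
-- a < b with a < 0, where the recursion never reaches the base cases.
def Pre_contains (a : Int) (b : Int) : Prop := (0 ≤ a ∧ 0 ≤ b) ∨ b ≤ a
instance (a : Int) (b : Int) : Decidable (Pre_contains a b) := by unfold Pre_contains; infer_instance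

def pvWitness_contains : Int × Int := (357, 12345678)

def Spec_contains (a : Int) (b : Int) (out : Bool) : Prop := out = contains_alt a b
instance (a : Int) (b : Int) (out : Bool) : Decidable (Spec_contains a b out) := by unfold Spec_contains; infer_instance

-- ===== CLAIM =====
def Claim_equal_contains : Prop := ∀ (a : Int) (b : Int), Dom_contains a b → Pre_contains a b → Spec_contains a b (contains a b)

-- ===== LEMMAS AND PROOFS =====

lemma isSubseq_refl (l : List Int) : isSubseq l l = true := by
  induction l with
  | nil => rfl
  | cons x xs ih => simp [isSubseq, ih]

-- unfolding for digitsLSB on positive n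
lemma digitsLSB_pos {n : Int} (h : 0 < n) :
    digitsLSB n = n % 10 :: digitsLSB (n / 10) := by
  rw [digitsLSB, dif_pos h, PySem.Int.mod_eq_emod_of_pos (show (0 : Int) < 10 by norm_num),
      PySem.Int.floordiv_eq_ediv_of_pos (show (0 : Int) < 10 by norm_num)]

lemma digitsLSB_nonpos {n : Int} (h : ¬ 0 < n) : digitsLSB n = [] := by
  rw [digitsLSB]; simp [h]

-- a subsequence match forces a ≤ b (0 ≤ a, 0 ≤ b)
lemma digitsLSB_zero : digitsLSB 0 = [] := digitsLSB_nonpos (by norm_num)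

lemma isSubseq_nil (l : List Int) : isSubseq [] l = true := by
  cases l <;> rfl

lemma isSubseq_le : ∀ (k : Nat) (a b : Int), b.natAbs ≤ k → 0 ≤ a → 0 ≤ b →
    isSubseq (digitsLSB a) (digitsLSB b) = true → a ≤ b := by
  intro k
  induction k with
  | zero =>
    intro a b hk ha hb hsub
    have hb0 : b = 0 := by omega
    subst hb0
    rcases lt_or_ge 0 a with hpos | hnp
    · rw [digitsLSB_pos hpos, digitsLSB_zero] at hsub
      simp [isSubseq] at hsub
    · omega
  | succ k ih =>
    intro a b hk ha hb hsub
    rcases lt_or_ge 0 b with hbpos | hbnp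
    · rcases lt_or_ge 0 a with hapos | hanp
      · rw [digitsLSB_pos hapos, digitsLSB_pos hbpos] at hsub
        have hb10 : (b / 10).natAbs ≤ k := by omega
        have ha10 : 0 ≤ a / 10 := by positivity
        have hb10' : 0 ≤ b / 10 := by positivity
        by_cases hm : a % 10 = b % 10
        · simp only [isSubseq, hm, if_true] at hsub
          have := ih (a / 10) (b / 10) hb10 ha10 hb10' hsub
          omega
        · simp only [isSubseq, if_neg hm] at hsub
          rw [← digitsLSB_pos hapos] at hsub
          have := ih a (b / 10) hb10 ha hb10' hsub
          omega
      · omega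
    · -- b = 0
      have hb0 : b = 0 := by omega
      subst hb0
      rcases lt_or_ge 0 a with hpos | hnp
      · rw [digitsLSB_pos hpos, digitsLSB_zero] at hsub
        simp [isSubseq] at hsub
      · omega

-- A's recursion computes the digit-subsequence predicate on nonnegative inputs
lemma containsFuel_eq : ∀ (f : Nat) (a b : Int), 0 ≤ a → 0 ≤ b → b.natAbs < f →
    containsFuel f a b = isSubseq (digitsLSB a) (digitsLSB b) := by
  intro f
  induction f with
  | zero => intro a b _ _ hf; omega
  | succ f ih =>
    intro a b ha hb hf
    rw [containsFuel]
    by_cases heq : a = b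
    · subst heq
      simp [isSubseq_refl]
    · by_cases hgt : a > b
      · simp only [if_neg heq, if_pos hgt]
        rcases (isSubseq (digitsLSB a) (digitsLSB b)).eq_false_or_eq_true with h | h
        · exact absurd (isSubseq_le b.natAbs a b le_rfl ha hb h) (by omega)
        · rw [h]
      · -- a < b, so 0 < b
        have hbpos : 0 < b := by omega
        simp only [if_neg heq, if_neg hgt]
        rw [PySem.Int.mod_eq_emod_of_pos (show (0:Int) < 10 by norm_num),
            PySem.Int.mod_eq_emod_of_pos (show (0:Int) < 10 by norm_num),
            PySem.Int.floordiv_eq_ediv_of_pos (show (0:Int) < 10 by norm_num),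
            PySem.Int.floordiv_eq_ediv_of_pos (show (0:Int) < 10 by norm_num)]
        have hbdec : (b / 10).natAbs < f := by omega
        have hb10 : 0 ≤ b / 10 := by positivity
        by_cases hm : a % 10 = b % 10
        · rw [if_pos hm]
          rcases lt_or_ge 0 a with hapos | hanp
          · have ha10 : 0 ≤ a / 10 := by positivity
            rw [digitsLSB_pos hapos, digitsLSB_pos hbpos]
            simp only [isSubseq]
            rw [if_pos hm]
            exact ih (a / 10) (b / 10) ha10 hb10 (by omega)
          · have ha0 : a = 0 := by omega
            subst ha0
            rw [digitsLSB_zero, show (0:Int) / 10 = 0 by norm_num,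
                ih 0 (b / 10) le_rfl hb10 hbdec, digitsLSB_zero]
            rw [isSubseq_nil, isSubseq_nil]
        · rw [if_neg hm]
          rcases lt_or_ge 0 a with hapos | hanp
          · rw [digitsLSB_pos hbpos]
            conv_rhs => rw [digitsLSB_pos hapos]
            simp only [isSubseq]
            rw [if_neg hm, ← digitsLSB_pos hapos]
            exact ih a (b / 10) ha hb10 hbdec
          · have ha0 : a = 0 := by omega
            subst ha0
            rw [digitsLSB_zero, ih 0 (b / 10) le_rfl hb10 hbdec, digitsLSB_zero]
            rw [isSubseq_nil, isSubseq_nil]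

-- ===== VERDICT =====
theorem contains_spec : Claim_equal_contains := by
  intro a b _ hpre
  unfold Spec_contains contains contains_alt
  by_cases heq : a = b
  · subst heq
    rw [containsFuel]
    simp
  · by_cases hgt : a > b
    · rw [containsFuel]
      simp [heq, hgt]
    · have ha : 0 ≤ a ∧ 0 ≤ b := by
        rcases hpre with h | h
        · exact h
        · omega
      rw [containsFuel_eq (b.natAbs + 1) a b ha.1 ha.2 (by omega)]
      simp [heq, hgt]
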